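-- pv_equiv track=rewrite | github.com/reece071005/neura-home-backend | matching.py | detect_device
-- ===== SOURCE A (Python) =====
-- DEVICE_SYNONYMS = {
--     "light": [
--         "light",
--         "lights",
--         "lightbulb",
--         "bulb",
--         "lamp",
--         "brightness",
--     ],
--     "fan": [
--         "fan",
--         "fans",
--     ],
--     "climate": [
--         "ac",
--         "air conditioner",
--         "climate",
--     ],
--     "cover": [
--         "blinds",
--         "curtains",
--         "cover",
--         "window blind",
--         "blind"
--     ],
-- }
--
-- def detect_device(text: str) -> str | None:
--     """
--     Detect canonical device from the text using DEVICE_SYNONYMS.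
--     Returns "light" | "fan" | "climate" | "cover" | None.
--     """
--     text_lower = text.lower()
--     tokens = text_lower.split()
--     for tok in tokens:
--         for device, syns in DEVICE_SYNONYMS.items():
--             if tok in syns:
--                 return device
--     return None
-- ===== SOURCE B (Python) =====
-- DEVICE_SYNONYMS = {
--     "light": [
--         "light",
--         "lights",
--         "lightbulb",
--         "bulb",
--         "lamp",
--         "brightness",
--     ],
--     "fan": [
--         "fan",
--         "fans",
--     ],
--     "climate": [
--         "ac",
--         "air conditioner",
--         "climate",
--     ],
--     "cover": [
--         "blinds",
--         "curtains",
--         "cover",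
--         "window blind",
--         "blind"
--     ],
-- }
--
-- # Reverse index built once: synonym -> canonical device.
-- SYNONYM_TO_DEVICE = {
--     syn: device
--     for device, syns in DEVICE_SYNONYMS.items()
--     for syn in syns
-- }
--
-- def detect_device(text: str) -> str | None:
--     for tok in text.lower().split():
--         device = SYNONYM_TO_DEVICE.get(tok)
--         if device is not None:
--             return device
--     return None
-- ===== Notes on version B (the rewrite author's own statement) =====
-- stated objective: idiomatic
-- what changed: Replaces the per-token nested scan over every synonym list with a reverse index SYNONYM_TO_DEVICE built once at module load, so detection is a single pass over tokens with one dict lookup each.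
import Mathlib
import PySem

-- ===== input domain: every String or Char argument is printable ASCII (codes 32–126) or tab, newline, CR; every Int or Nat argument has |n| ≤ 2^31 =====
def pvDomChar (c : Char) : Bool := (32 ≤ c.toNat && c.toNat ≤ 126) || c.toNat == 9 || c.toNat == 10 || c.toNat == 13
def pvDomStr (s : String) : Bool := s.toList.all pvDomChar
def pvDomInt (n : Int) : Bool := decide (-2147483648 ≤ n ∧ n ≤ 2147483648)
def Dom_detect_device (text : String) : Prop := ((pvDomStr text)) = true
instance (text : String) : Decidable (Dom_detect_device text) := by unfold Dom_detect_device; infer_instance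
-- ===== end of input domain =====

-- B builds a reverse synonym->device index once and scans tokens with one lookup each,
-- instead of A's nested scan over every synonym list per token (idiomatic; same results).

-- ===== PORT A =====
def deviceSynonyms : List (String × List String) :=
  [("light", ["light", "lights", "lightbulb", "bulb", "lamp", "brightness"]),
   ("fan", ["fan", "fans"]),
   ("climate", ["ac", "air conditioner", "climate"]),
   ("cover", ["blinds", "curtains", "cover", "window blind", "blind"])]

-- inner `for device, syns in DEVICE_SYNONYMS.items(): if tok in syns: return device`
def detectInnerA (tok : String) : List (String × List String) → Option String
  | [] => none
  | (device, syns) :: rest =>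
    if tok ∈ syns then some device else detectInnerA tok rest

-- outer `for tok in tokens`
def detectOuterA : List String → Option String
  | [] => none
  | tok :: rest =>
    match detectInnerA tok deviceSynonyms with
    | some d => some d
    | none => detectOuterA rest

def detect_device (text : String) : Option String :=
  detectOuterA (PySem.Str.split₀ (PySem.Str.lower text))

-- ===== PORT B =====
-- `SYNONYM_TO_DEVICE = {syn: device for device, syns in DEVICE_SYNONYMS.items() for syn in syns}`
def synonymToDevice : PySem.Dict String String :=
  deviceSynonyms.foldl
    (fun d p => p.2.foldl (fun d syn => d.insert syn p.1) d)
    PySem.Dict.empty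

def detectLoopB : List String → Option String
  | [] => none
  | tok :: rest =>
    match synonymToDevice.get? tok with
    | some d => some d
    | none => detectLoopB rest

def detect_device_alt (text : String) : Option String :=
  detectLoopB (PySem.Str.split₀ (PySem.Str.lower text))

-- ===== PRECONDITION & SPEC =====
def Spec_detect_device (text : String) (out : Option String) : Prop := out = detect_device_alt text
instance (text : String) (out : Option String) : Decidable (Spec_detect_device text out) := by unfold Spec_detect_device; infer_instance

-- ===== CLAIM (what is proved, stated in full; the proofs are below) =====
def Claim_equal_detect_device : Prop := ∀ (text : String), Dom_detect_device text → Spec_detect_device text (detect_device text)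

-- ===== LEMMAS AND PROOFS =====

-- the built reverse index, as a literal dict
theorem synonymToDevice_eq :
    synonymToDevice = PySem.Dict.mk
      [("light", "light"), ("lights", "light"), ("lightbulb", "light"),
       ("bulb", "light"), ("lamp", "light"), ("brightness", "light"),
       ("fan", "fan"), ("fans", "fan"),
       ("ac", "climate"), ("air conditioner", "climate"), ("climate", "climate"),
       ("blinds", "cover"), ("curtains", "cover"), ("cover", "cover"),
       ("window blind", "cover"), ("blind", "cover")] := by decide

-- per-token: A's nested scan agrees with B's index lookup
theorem inner_eq_lookup (tok : String) :
    detectInnerA tok deviceSynonyms = synonymToDevice.get? tok := by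
  by_cases h0 : tok = "light"
  · subst h0; decide
  by_cases h1 : tok = "lights"
  · subst h1; decide
  by_cases h2 : tok = "lightbulb"
  · subst h2; decide
  by_cases h3 : tok = "bulb"
  · subst h3; decide
  by_cases h4 : tok = "lamp"
  · subst h4; decide
  by_cases h5 : tok = "brightness"
  · subst h5; decide
  by_cases h6 : tok = "fan"
  · subst h6; decide
  by_cases h7 : tok = "fans"
  · subst h7; decide
  by_cases h8 : tok = "ac"
  · subst h8; decide
  by_cases h9 : tok = "air conditioner"
  · subst h9; decide
  by_cases h10 : tok = "climate"
  · subst h10; decide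
  by_cases h11 : tok = "blinds"
  · subst h11; decide
  by_cases h12 : tok = "curtains"
  · subst h12; decide
  by_cases h13 : tok = "cover"
  · subst h13; decide
  by_cases h14 : tok = "window blind"
  · subst h14; decide
  by_cases h15 : tok = "blind"
  · subst h15; decide
  · simp [detectInnerA, deviceSynonyms, synonymToDevice_eq, PySem.Dict.get?,
      h0, h1, h2, h3, h4, h5, h6, h7, h8, h9, h10, h11, h12, h13, h14, h15, Ne.symm]

theorem loops_eq (toks : List String) : detectOuterA toks = detectLoopB toks := by
  induction toks with
  | nil => rfl
  | cons t rest ih =>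
    simp only [detectOuterA, detectLoopB, inner_eq_lookup, ih]

-- ===== VERDICT (by name: the statement is the Claim_ definition above) =====
theorem detect_device_spec : Claim_equal_detect_device := by
  intro text _
  unfold Spec_detect_device detect_device detect_device_alt
  exact loops_eq _
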